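-- pv_equiv track=rewrite | github.com/sejeong-park/Study-Algoritm | 2023 알고리즘스터디/연습 중/test.py | solution
-- ===== SOURCE A (Python) =====
-- def solution(size_info, shirts_info) :
-- 	answer = 0
--
-- 	for size in size_info :
-- 		min_money, check = int(1e9), int(1e9)
-- 		for target_size, money in shirts_info :
-- 			if size - 5 <= target_size <= size + 5:
-- 				min_money = min(min_money, money)
-- 			if size <= target_size :
-- 				check = min(check, money)
-- 		if min_money == int(1e9):
-- 			min_money = check
-- 		answer += min_money
-- 	return answer
-- ===== SOURCE B (Python) =====
-- from bisect import bisect_left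
--
-- def solution(size_info, shirts_info):
--     INF = int(1e9)
--     # cheapest shirt per distinct size (capped at the INF sentinel, like A's min-accumulator)
--     best = {}
--     for t, m in shirts_info:
--         best[t] = min(best.get(t, INF), m)
--     ks = sorted(best)
--     # suf[i] = min price over all shirt sizes ks[i:], suf[len(ks)] = INF
--     suf = [INF] * (len(ks) + 1)
--     for i in range(len(ks) - 1, -1, -1):
--         suf[i] = min(best[ks[i]], suf[i + 1])
--     answer = 0
--     for s in size_info:
--         r = INF
--         for d in range(s - 5, s + 6):
--             r = min(r, best.get(d, INF))
--         if r == INF: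
--             r = suf[bisect_left(ks, s)]
--         answer += r
--     return answer
-- ===== Notes on version B (the rewrite author's own statement) =====
-- stated objective: faster
-- what changed: Replaces the per-size full scan of all shirts by a one-pass dict of cheapest price per shirt size plus a sorted-key suffix-min array: each query does 11 dict probes for the +-5 window and one bisect for the >=size fallback.
import Mathlib
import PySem

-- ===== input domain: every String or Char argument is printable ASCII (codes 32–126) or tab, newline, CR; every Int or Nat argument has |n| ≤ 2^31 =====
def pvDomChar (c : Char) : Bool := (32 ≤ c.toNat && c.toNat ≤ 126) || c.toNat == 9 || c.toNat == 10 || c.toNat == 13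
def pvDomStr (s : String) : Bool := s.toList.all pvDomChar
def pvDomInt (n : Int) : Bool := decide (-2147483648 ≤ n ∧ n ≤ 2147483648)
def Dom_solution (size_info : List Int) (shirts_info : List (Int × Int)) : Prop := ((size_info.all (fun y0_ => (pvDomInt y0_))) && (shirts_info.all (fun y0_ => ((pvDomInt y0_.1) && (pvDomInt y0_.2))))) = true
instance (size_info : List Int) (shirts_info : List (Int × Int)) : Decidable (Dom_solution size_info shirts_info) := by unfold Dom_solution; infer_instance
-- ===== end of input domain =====

-- B replaces A's per-size full scan of the shirt list by a cheapest-price-per-size dict with a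
-- sorted-key suffix-min array: 11 dict probes for the ±5 window and one bisect for the ≥size
-- fallback per query (measured faster on large inputs in a timing run).


-- ===== PORT A =====
def solution (size_info : List Int) (shirts_info : List (Int × Int)) : Int :=
  size_info.foldl (fun answer size =>
    let p := shirts_info.foldl (fun (mc : Int × Int) tm =>
      let mc := if size - 5 ≤ tm.1 ∧ tm.1 ≤ size + 5 then (min mc.1 tm.2, mc.2) else mc
      let mc := if size ≤ tm.1 then (mc.1, min mc.2 tm.2) else mc
      mc) (1000000000, 1000000000)
    answer + (if p.1 = 1000000000 then p.2 else p.1)) 0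

-- ===== PORT B =====
-- suf: Python fills the suffix-min array back to front with an index loop; ported as the
-- structural recursion producing the same list (suf has length ks.length + 1).
def sufBuild (best : PySem.Dict Int Int) (ks : List Int) : List Int :=
  match ks with
  | [] => [1000000000]
  | k :: rest =>
      let s := sufBuild best rest
      (min (best.getD k 1000000000) (s.headD 1000000000)) :: s

def solution_alt (size_info : List Int) (shirts_info : List (Int × Int)) : Int :=
  let best : PySem.Dict Int Int :=
    shirts_info.foldl (fun d tm => d.insert tm.1 (min (d.getD tm.1 1000000000) tm.2))
      PySem.Dict.empty
  let ks : List Int := PySem.List.sorted best.keys (fun x => x) false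
  let suf : List Int := sufBuild best ks
  size_info.foldl (fun answer s =>
    let r := (PySem.List.pyRange (s - 5) (s + 6) 1).foldl
      (fun r d => min r (best.getD d 1000000000)) 1000000000
    -- suf[bisect_left(ks, s)]: the index is always in range (≤ ks.length < suf.length)
    let r := if r = 1000000000 then suf.getD (PySem.List.bisectLeft ks s) 1000000000 else r
    answer + r) 0

-- ===== PRECONDITION & SPEC =====
def Spec_solution (size_info : List Int) (shirts_info : List (Int × Int)) (out : Int) : Prop := out = solution_alt size_info shirts_info
instance (size_info : List Int) (shirts_info : List (Int × Int)) (out : Int) : Decidable (Spec_solution size_info shirts_info out) := by unfold Spec_solution; infer_instance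

-- ===== CLAIM (what is proved, stated in full; the proofs are below) =====
def Claim_equal_solution : Prop := ∀ (size_info : List Int) (shirts_info : List (Int × Int)), Dom_solution size_info shirts_info → Spec_solution size_info shirts_info (solution size_info shirts_info)

-- ===== LEMMAS AND PROOFS =====

-- proof-side names
def pvBest (shirts : List (Int × Int)) : PySem.Dict Int Int :=
  shirts.foldl (fun d tm => d.insert tm.1 (min (d.getD tm.1 1000000000) tm.2)) PySem.Dict.empty

def pvRmin (s : Int) (shirts : List (Int × Int)) (a : Int) : Int :=
  shirts.foldl (fun r tm => if s - 5 ≤ tm.1 ∧ tm.1 ≤ s + 5 then min r tm.2 else r) a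

def pvGmin (s : Int) (shirts : List (Int × Int)) (a : Int) : Int :=
  shirts.foldl (fun r tm => if s ≤ tm.1 then min r tm.2 else r) a

-- A's inner loop computes the two filtered running minima
theorem pvA_inner (s : Int) (shirts : List (Int × Int)) : ∀ (a b : Int),
    shirts.foldl (fun (mc : Int × Int) tm =>
      let mc := if s - 5 ≤ tm.1 ∧ tm.1 ≤ s + 5 then (min mc.1 tm.2, mc.2) else mc
      let mc := if s ≤ tm.1 then (mc.1, min mc.2 tm.2) else mc
      mc) (a, b) = (pvRmin s shirts a, pvGmin s shirts b) := by
  induction shirts with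
  | nil => intro a b; simp [pvRmin, pvGmin]
  | cons tm rest ih =>
      intro a b
      simp only [List.foldl_cons, pvRmin, pvGmin]
      split_ifs <;> simpa [pvRmin, pvGmin] using ih _ _

-- pulling a min out of a min-fold
theorem pv_fold_min_out (g : Int → Int) : ∀ (l : List Int) (a c : Int),
    l.foldl (fun r x => min r (g x)) (min a c) = min (l.foldl (fun r x => min r (g x)) a) c := by
  intro l
  induction l with
  | nil => intro a c; simp
  | cons x t ih =>
      intro a c
      simp only [List.foldl_cons]
      rw [show min (min a c) (g x) = min (min a (g x)) c by
        rw [min_assoc, min_comm c (g x), ← min_assoc], ih]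

-- inserting (t ↦ min (old t) m) changes a min-fold over a nodup key list by min-ing in m iff t is probed
theorem pv_probe_insert : ∀ (l : List Int), l.Nodup → ∀ (d : PySem.Dict Int Int) (t m a : Int),
    l.foldl (fun r x => min r ((d.insert t (min (d.getD t 1000000000) m)).getD x 1000000000)) a
      = if t ∈ l then min (l.foldl (fun r x => min r (d.getD x 1000000000)) a) m
        else l.foldl (fun r x => min r (d.getD x 1000000000)) a := by
  intro l
  induction l with
  | nil => intro _ d t m a; simp
  | cons x rest ih =>
      intro hn d t m a
      rw [List.nodup_cons] at hn
      obtain ⟨hxr, hr⟩ := hn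
      simp only [List.foldl_cons]
      by_cases hx : x = t
      · subst hx
        have hc : ∀ (b : Int),
            List.foldl (fun r y =>
                min r ((d.insert x (min (d.getD x 1000000000) m)).getD y 1000000000)) b rest
            = List.foldl (fun r y => min r (d.getD y 1000000000)) b rest := by
          intro b
          apply PySem.List.foldl_congr_mem
          intro acc y hy
          have hyt : y ≠ x := fun h => hxr (h ▸ hy)
          simp [PySem.Dict.getD_insert, hyt]
        rw [hc, PySem.Dict.getD_insert, if_pos rfl, if_pos (List.mem_cons_self)]
        rw [show min a (min (d.getD x 1000000000) m) = min (min a (d.getD x 1000000000)) m from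
          by rw [min_assoc]]
        exact pv_fold_min_out _ rest _ m
      · have hacc : (d.insert t (min (d.getD t 1000000000) m)).getD x 1000000000
            = d.getD x 1000000000 := by
          rw [PySem.Dict.getD_insert, if_neg hx]
        rw [hacc, ih hr d t m (min a (d.getD x 1000000000))]
        by_cases ht : t ∈ rest
        · rw [if_pos ht, if_pos (List.mem_cons_of_mem _ ht)]
        · rw [if_neg ht, if_neg (by simp [List.mem_cons, ht, Ne.symm hx])]

-- the 11-probe window min equals A's range minimum
theorem pv_probe_best (s : Int) (shirts : List (Int × Int)) :
    (PySem.List.pyRange (s - 5) (s + 6) 1).foldl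
      (fun r x => min r ((pvBest shirts).getD x 1000000000)) 1000000000
    = pvRmin s shirts 1000000000 := by
  induction shirts using List.reverseRecOn with
  | nil =>
      simp only [pvBest, List.foldl_nil, pvRmin]
      have h : ∀ (l : List Int),
          l.foldl (fun r x =>
            min r ((PySem.Dict.empty : PySem.Dict Int Int).getD x 1000000000)) 1000000000
          = 1000000000 := by
        intro l
        induction l with
        | nil => rfl
        | cons y t iht => simpa [PySem.Dict.getD_empty] using iht
      exact h _
  | append_singleton xs tm ih =>
      have hb : pvBest (xs ++ [tm])
          = (pvBest xs).insert tm.1 (min ((pvBest xs).getD tm.1 1000000000) tm.2) := by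
        simp [pvBest]
      rw [hb, pv_probe_insert _ (PySem.List.nodup_pyRange_one _ _) (pvBest xs) tm.1 tm.2, ih]
      have hmem : tm.1 ∈ PySem.List.pyRange (s - 5) (s + 6) 1 ↔ (s - 5 ≤ tm.1 ∧ tm.1 ≤ s + 5) := by
        rw [PySem.List.mem_pyRange_one]; omega
      have hr : pvRmin s (xs ++ [tm]) 1000000000
          = if s - 5 ≤ tm.1 ∧ tm.1 ≤ s + 5 then min (pvRmin s xs 1000000000) tm.2
            else pvRmin s xs 1000000000 := by
        simp only [pvRmin, List.foldl_append, List.foldl_cons, List.foldl_nil]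
      rw [hr]
      by_cases h : s - 5 ≤ tm.1 ∧ tm.1 ≤ s + 5
      · rw [if_pos (hmem.mpr h), if_pos h]
      · rw [if_neg (fun hm => h (hmem.mp hm)), if_neg h]

-- suffix array lookup = min-fold over the dropped tail
theorem pv_sufBuild_getD (best : PySem.Dict Int Int) : ∀ (ks : List Int) (i : Nat), i ≤ ks.length →
    (sufBuild best ks).getD i 1000000000
      = (ks.drop i).foldl (fun r k => min r (best.getD k 1000000000)) 1000000000 := by
  intro ks
  induction ks with
  | nil =>
      intro i hi
      have h0 : i = 0 := Nat.le_zero.mp hi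
      subst h0
      simp [sufBuild]
  | cons k rest ih =>
      intro i hi
      match i with
      | 0 =>
          have h0 := ih 0 (Nat.zero_le _)
          have hhead : (sufBuild best rest).headD 1000000000
              = rest.foldl (fun r k => min r (best.getD k 1000000000)) 1000000000 := by
            cases hrest : sufBuild best rest with
            | nil => cases rest <;> simp [sufBuild] at hrest
            | cons a t =>
                rw [hrest] at h0
                simpa [List.getD] using h0
          simp only [sufBuild, List.getD, List.drop_zero, List.foldl_cons,
            List.getElem?_cons_zero, Option.getD_some]
          rw [hhead, min_comm (best.getD k 1000000000)]
          exact (pv_fold_min_out (fun k => best.getD k 1000000000) rest 1000000000 _).symm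
      | Nat.succ j =>
          have hj : j ≤ rest.length := by simpa using hi
          simpa [sufBuild, List.getD] using ih j hj

-- on a sorted list, dropping bisect_left's index is filtering by (s ≤ ·)
theorem pv_drop_bisect (ks : List Int) (s : Int) (hs : ks.Pairwise (· ≤ ·)) :
    ks.drop (PySem.List.bisectLeft ks s) = ks.filter (fun k => decide (s ≤ k)) := by
  obtain ⟨hle, hlt, hge⟩ := PySem.List.bisectLeft_spec ks s hs
  conv_rhs => rw [← List.take_append_drop (PySem.List.bisectLeft ks s) ks]
  rw [List.filter_append]
  have h1 : (ks.take (PySem.List.bisectLeft ks s)).filter (fun k => decide (s ≤ k)) = [] := by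
    apply List.filter_eq_nil_iff.mpr
    intro a ha
    obtain ⟨j, hj, hja⟩ := List.mem_take_iff_getElem.mp ha
    have hjl : j < ks.length := by omega
    have := hlt j hjl (by omega)
    simp only [decide_eq_true_eq]
    omega
  have h2 : (ks.drop (PySem.List.bisectLeft ks s)).filter (fun k => decide (s ≤ k))
      = ks.drop (PySem.List.bisectLeft ks s) := by
    apply List.filter_eq_self.mpr
    intro a ha
    obtain ⟨j, hj, hja⟩ := List.getElem_of_mem ha
    rw [List.getElem_drop] at hja
    have hlen : PySem.List.bisectLeft ks s + j < ks.length := by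
      rw [List.length_drop] at hj; omega
    have := hge (PySem.List.bisectLeft ks s + j) hlen (by omega)
    rw [hja] at this
    simpa using this
  rw [h1, h2, List.nil_append]

-- a min-fold never exceeds its seed
theorem pv_fold_min_le_seed (g : Int → Int) (l : List Int) (a : Int) :
    l.foldl (fun r x => min r (g x)) a ≤ a := by
  have h := pv_fold_min_out g l a a
  rw [min_self] at h
  rw [h]
  exact min_le_right _ _

-- the filtered-key min-fold over the best dict equals A's ≥-minimum
theorem pv_kq_best (s : Int) (shirts : List (Int × Int)) :
    (((pvBest shirts).keys.filter (fun k => decide (s ≤ k))).foldl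
      (fun r k => min r ((pvBest shirts).getD k 1000000000)) 1000000000)
    = pvGmin s shirts 1000000000 := by
  induction shirts using List.reverseRecOn with
  | nil => simp [pvBest, pvGmin, PySem.Dict.empty, PySem.Dict.keys]
  | append_singleton xs tm ih =>
      have hb : pvBest (xs ++ [tm])
          = (pvBest xs).insert tm.1 (min ((pvBest xs).getD tm.1 1000000000) tm.2) := by
        simp [pvBest]
      have hnodup : (pvBest xs).keys.Nodup := by
        apply PySem.Dict.nodup_keys_foldl_insert_key
        simp [PySem.Dict.keys_empty]
      have hg : pvGmin s (xs ++ [tm]) 1000000000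
          = if s ≤ tm.1 then min (pvGmin s xs 1000000000) tm.2 else pvGmin s xs 1000000000 := by
        simp only [pvGmin, List.foldl_append, List.foldl_cons, List.foldl_nil]
      rw [hb, hg]
      by_cases hc : (pvBest xs).contains tm.1
      · -- existing key: key list unchanged, stored value min-ed with tm.2
        rw [PySem.Dict.keys_insert_of_contains _ _ hc]
        rw [pv_probe_insert _ (hnodup.filter _) (pvBest xs) tm.1 tm.2]
        have hmem : tm.1 ∈ (pvBest xs).keys := (PySem.Dict.contains_iff_mem_keys _ _).mp hc
        by_cases hst : s ≤ tm.1
        · rw [if_pos (by simp [List.mem_filter, hmem, hst]), ih, if_pos hst]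
        · rw [if_neg (by simp [List.mem_filter, hst]), ih, if_neg hst]
      · -- fresh key appended at the end
        have hnm : tm.1 ∉ (pvBest xs).keys := fun h =>
          hc ((PySem.Dict.contains_iff_mem_keys _ _).mpr h)
        rw [PySem.Dict.keys_insert_of_not_contains _ _ (by simpa using hc), List.filter_append]
        have hcongr : ∀ (l : List Int), (∀ k ∈ l, k ≠ tm.1) → ∀ (a : Int),
            l.foldl (fun r k => min r (((pvBest xs).insert tm.1
                (min ((pvBest xs).getD tm.1 1000000000) tm.2)).getD k 1000000000)) a
            = l.foldl (fun r k => min r ((pvBest xs).getD k 1000000000)) a := by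
          intro l hl a
          apply PySem.List.foldl_congr_mem
          intro acc x hx
          rw [PySem.Dict.getD_insert, if_neg (hl x hx)]
        have hv : (pvBest xs).getD tm.1 1000000000 = 1000000000 :=
          PySem.Dict.getD_of_not_contains _ _ (by simpa using hc)
        by_cases hst : s ≤ tm.1
        · rw [if_pos hst]
          simp only [List.filter_cons, decide_eq_true_eq, if_pos hst, List.filter_nil]
          rw [List.foldl_append, List.foldl_cons, List.foldl_nil]
          rw [hcongr _ (fun k hk => by rintro rfl; exact hnm (List.mem_filter.mp hk).1) _]
          rw [PySem.Dict.getD_insert, if_pos rfl, hv, ih]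
          have hle : pvGmin s xs 1000000000 ≤ 1000000000 := by
            rw [← ih]
            exact pv_fold_min_le_seed _ _ _
          rw [show min (pvGmin s xs 1000000000) (min 1000000000 tm.2)
              = min (min (pvGmin s xs 1000000000) 1000000000) tm.2 by rw [min_assoc]]
          rw [min_eq_left hle]
        · rw [if_neg hst]
          simp only [List.filter_cons, decide_eq_true_eq, if_neg hst, List.filter_nil,
            List.append_nil]
          rw [hcongr _ (fun k hk => by rintro rfl; exact hnm (List.mem_filter.mp hk).1) _]
          exact ih

-- B's fallback lookup equals A's ≥-minimum
theorem pv_fallback (s : Int) (shirts : List (Int × Int)) :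
    (sufBuild (pvBest shirts)
        (PySem.List.sorted (pvBest shirts).keys (fun x => x) false)).getD
      (PySem.List.bisectLeft (PySem.List.sorted (pvBest shirts).keys (fun x => x) false) s)
      1000000000
    = pvGmin s shirts 1000000000 := by
  set best := pvBest shirts with hbest
  set ks := PySem.List.sorted best.keys (fun x => x) false with hks
  have hpair : ks.Pairwise (· ≤ ·) := by
    have := PySem.List.sorted_pairwise best.keys (fun x => x)
    simpa using this
  have hspec := PySem.List.bisectLeft_spec ks s hpair
  have hle : PySem.List.bisectLeft ks s ≤ ks.length := hspec.1
  rw [pv_sufBuild_getD best ks _ hle, pv_drop_bisect ks s hpair]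
  have hperm : (ks.filter (fun k => decide (s ≤ k))).Perm
      (best.keys.filter (fun k => decide (s ≤ k))) :=
    (PySem.List.sorted_perm best.keys (fun x => x) false).filter _
  haveI hrc : RightCommutative (fun (r : Int) (k : Int) => min r (best.getD k 1000000000)) :=
    ⟨fun b a₁ a₂ => min_right_comm _ _ _⟩
  rw [hperm.foldl_eq 1000000000]
  exact pv_kq_best s shirts

-- ===== VERDICT (by name: the statement is the Claim_ definition above) =====
theorem solution_spec : Claim_equal_solution := by
  intro size_info shirts _
  unfold Spec_solution solution solution_alt
  apply PySem.List.foldl_congr_mem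
  intro acc s _
  rw [pvA_inner s shirts 1000000000 1000000000]
  have hprobe := pv_probe_best s shirts
  have hfall := pv_fallback s shirts
  simp only [pvBest] at hprobe hfall
  rw [hprobe, hfall]
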